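-- pv_equiv track=rewrite | github.com/shri-prakhar/match-making | talent_matching/location/resolver.py | get_region_for_country
-- ===== SOURCE A (Python) =====
-- def get_region_for_country(
--     country: str,
--     region_countries: dict[str, set[str]],
-- ) -> str | None:
--     """Return the region (lowercase) for a country given loaded region_countries.
--
--     First region wins when a country appears in multiple regions (sorted key order).
--     Caller must pass the result of load_region_countries (or hardcoded equivalent).
--     """
--     if not country or not (country := (country or "").strip().lower()):
--         return None
--     for region in sorted(region_countries.keys()):
--         if country in region_countries[region]:
--             return region
--     return None
-- ===== SOURCE B (Python) =====
-- def get_region_for_country(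
--     country: str,
--     region_countries: dict[str, set[str]],
-- ) -> str | None:
--     country = (country or "").strip().lower()
--     if not country:
--         return None
--     best = None
--     for region, countries in region_countries.items():
--         if country in countries and (best is None or region < best):
--             best = region
--     return best
-- ===== Notes on version B (the rewrite author's own statement) =====
-- stated objective: simpler
-- what changed: B replaces A's sort of all region keys plus early-exit scan with key re-lookup by a single unsorted pass over the (region, countries) items, keeping the lexicographically smallest matching region in an accumulator (the minimum matching key equals the first match in sorted order).
import Mathlib
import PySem

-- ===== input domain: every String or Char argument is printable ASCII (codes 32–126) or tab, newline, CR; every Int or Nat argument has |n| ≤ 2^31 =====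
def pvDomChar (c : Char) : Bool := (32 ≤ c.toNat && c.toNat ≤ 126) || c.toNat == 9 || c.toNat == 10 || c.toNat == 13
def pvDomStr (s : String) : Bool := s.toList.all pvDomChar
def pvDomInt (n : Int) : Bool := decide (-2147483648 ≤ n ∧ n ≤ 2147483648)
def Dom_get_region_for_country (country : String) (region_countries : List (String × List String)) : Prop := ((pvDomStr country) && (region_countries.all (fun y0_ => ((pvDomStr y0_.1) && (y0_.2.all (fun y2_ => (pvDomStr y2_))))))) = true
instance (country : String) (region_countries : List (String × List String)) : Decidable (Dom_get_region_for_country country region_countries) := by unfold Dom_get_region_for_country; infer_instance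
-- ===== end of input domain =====

-- B replaces A's sort-then-scan (with key re-lookup) by one accumulator pass over the
-- dict's items keeping the smallest matching region key (objective: simpler — no sort).

-- ===== PORT A =====
-- A: guard (empty / whitespace-only → None, else strip().lower()), then scan the
-- sorted keys returning the first region whose set contains the country.
def get_region_for_country (country : String) (region_countries : List (String × List String)) : Option String :=
  if country = "" then none
  else
    let c := PySem.Str.lower (PySem.Str.strip country)
    if c = "" then none
    else
      let d := PySem.Dict.ofList region_countries
      (PySem.List.sorted (PySem.Dict.keys d) (fun r => r) false).find?
        (fun r => (PySem.Dict.getD d r []).contains c)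

-- ===== PORT B =====
-- B: same guard, then `for region, countries in items(): if country in countries and
-- (best is None or region < best): best = region`.
def get_region_for_country_alt (country : String) (region_countries : List (String × List String)) : Option String :=
  let c := PySem.Str.lower (PySem.Str.strip country)
  if c = "" then none
  else
    (PySem.Dict.ofList region_countries).items.foldl
      (fun best rc =>
        if rc.2.contains c && (match best with | none => true | some b => decide (rc.1 < b))
        then some rc.1 else best)
      none

-- ===== PRECONDITION & SPEC =====
def Spec_get_region_for_country (country : String) (region_countries : List (String × List String)) (out : Option String) : Prop := out = get_region_for_country_alt country region_countries
instance (country : String) (region_countries : List (String × List String)) (out : Option String) : Decidable (Spec_get_region_for_country country region_countries out) := by unfold Spec_get_region_for_country; infer_instance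

-- ===== CLAIM (what is proved, stated in full; the proofs are below) =====
def Claim_equal_get_region_for_country : Prop := ∀ (country : String) (region_countries : List (String × List String)), Dom_get_region_for_country country region_countries → Spec_get_region_for_country country region_countries (get_region_for_country country region_countries)

-- ===== LEMMAS AND PROOFS =====

-- the first hit of a scan over a (≤)-sorted list is ≤ every hit
theorem pv_find?_min_of_pairwise (t : List String) (p : String → Bool)
    (ht : t.Pairwise (· ≤ ·)) {m : String} (h : t.find? p = some m) :
    ∀ y ∈ t, p y = true → m ≤ y := by
  induction t with
  | nil => simp at h
  | cons a t ih =>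
    rcases List.pairwise_cons.mp ht with ⟨ha, ht'⟩
    by_cases hpa : p a = true
    · rw [List.find?_cons_of_pos hpa] at h
      obtain rfl : a = m := by simpa using h
      intro y hy hpy
      rcases List.mem_cons.mp hy with rfl | hy'
      · exact le_refl _
      · exact ha y hy'
    · rw [List.find?_cons_of_neg (by simpa using hpa)] at h
      intro y hy hpy
      rcases List.mem_cons.mp hy with rfl | hy'
      · exact absurd hpy hpa
      · exact ih ht' h y hy' hpy

-- first match in sorted key order = minimum of the matching keys
theorem pv_find_sorted_eq_min_filter (ks : List String) (p : String → Bool) :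
    (PySem.List.sorted ks (fun r => r) false).find? p
      = PySem.List.min? (ks.filter p) (fun r => r) := by
  set s := PySem.List.sorted ks (fun r => r) false with hs
  have hperm : s.Perm ks := PySem.List.sorted_perm ks (fun r => r) false
  cases hf : s.find? p with
  | none =>
    have hnone : ∀ x ∈ s, ¬ p x = true := by
      intro x hx; exact List.find?_eq_none.mp hf x hx
    have hfil : ks.filter p = [] := by
      apply List.filter_eq_nil_iff.mpr
      intro x hx
      exact hnone x (hperm.mem_iff.mpr hx)
    rw [hfil]
    exact ((PySem.List.min?_eq_none_iff _ _).mpr rfl).symm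
  | some m =>
    have hpm : p m = true := List.find?_some hf
    have hms : m ∈ s := List.mem_of_find?_eq_some hf
    have hmin : ∀ y ∈ ks.filter p, m ≤ y := by
      intro y hy
      rcases List.mem_filter.mp hy with ⟨hyk, hpy⟩
      exact pv_find?_min_of_pairwise s p
        (PySem.List.sorted_pairwise ks (fun r => r)) hf y (hperm.mem_iff.mpr hyk) hpy
    have hmem : m ∈ ks.filter p := List.mem_filter.mpr ⟨hperm.mem_iff.mp hms, hpm⟩
    cases hm' : PySem.List.min? (ks.filter p) (fun r => r) with
    | none =>
      exact absurd ((PySem.List.min?_eq_none_iff _ _).mp hm' ▸ hmem) (by simp)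
    | some m' =>
      have hm'mem : m' ∈ ks.filter p := PySem.List.min?_mem hm'
      have h1 : m' ≤ m := PySem.List.min?_isMin hm' m hmem
      have h2 : m ≤ m' := hmin m' hm'mem
      exact congrArg some (le_antisymm h2 h1)

-- B's accumulator step restricted to the matching keys
def pvBestStep (b : Option String) (r : String) : Option String :=
  if (match b with | none => true | some b' => decide (r < b')) then some r else b

-- the item fold equals the key fold over the matching keys
theorem pv_foldl_items_eq_keys (c : String) (l : List (String × List String))
    (acc : Option String) :
    l.foldl (fun best rc =>
        if rc.2.contains c && (match best with | none => true | some b => decide (rc.1 < b))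
        then some rc.1 else best) acc
      = ((l.filter (fun rc => rc.2.contains c)).map (fun rc => rc.1)).foldl pvBestStep acc := by
  induction l generalizing acc with
  | nil => rfl
  | cons a t ih =>
    rw [List.foldl_cons, List.filter_cons]
    by_cases hpa : a.2.contains c = true
    · rw [if_pos hpa, List.map_cons, List.foldl_cons, ih]
      congr 1
      have hm : c ∈ a.2 := by simpa using hpa
      simp [pvBestStep, hm]
    · rw [if_neg hpa, ih]
      congr 1
      have hm : c ∉ a.2 := by simpa using hpa
      simp [hm]

-- running strict-min over `some x` is the running `min` fold
theorem pv_foldl_bestStep_some (t : List String) (x : String) :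
    t.foldl pvBestStep (some x) = some (t.foldl min x) := by
  induction t generalizing x with
  | nil => rfl
  | cons a t ih =>
    have hstep : pvBestStep (some x) a = some (min x a) := by
      unfold pvBestStep
      rcases le_total x a with h | h
      · rw [if_neg (by simpa using not_lt.mpr h), min_eq_left h]
      · by_cases hlt : a < x
        · rw [if_pos (by simpa using hlt), min_eq_right h]
        · rw [if_neg (by simpa using hlt), min_eq_left (le_of_not_gt hlt)]
    simp [List.foldl_cons, hstep, ih]

-- B's loop from None computes the minimum of the matching keys
theorem pv_foldl_bestStep_eq_min? (ms : List String) :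
    ms.foldl pvBestStep none = PySem.List.min? ms (fun r => r) := by
  cases ms with
  | nil => rfl
  | cons m t =>
    rw [PySem.List.min?_id_cons]
    simpa [List.foldl_cons, pvBestStep] using pv_foldl_bestStep_some t m

-- ===== VERDICT (by name: the statement is the Claim_ definition above) =====
theorem get_region_for_country_spec : Claim_equal_get_region_for_country := by
  intro country region_countries _
  unfold Spec_get_region_for_country get_region_for_country get_region_for_country_alt
  by_cases h0 : country = ""
  · subst h0
    have he : PySem.Str.lower (PySem.Str.strip "") = "" := by decide
    simp [he]
  · simp only [if_neg h0]
    by_cases hc : PySem.Str.lower (PySem.Str.strip country) = ""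
    · simp [hc]
    · simp only [if_neg hc]
      set c := PySem.Str.lower (PySem.Str.strip country) with hcdef
      set d := PySem.Dict.ofList region_countries with hd
      have hnd : d.keys.Nodup := PySem.Dict.nodup_keys_ofList region_countries
      have hitems : d.items = d.keys.map (fun k => (k, d.getD k [])) :=
        PySem.Dict.items_eq_map_keys d hnd []
      rw [pv_find_sorted_eq_min_filter, pv_foldl_items_eq_keys, hitems,
        List.filter_map, List.map_map, ← pv_foldl_bestStep_eq_min?]
      congr 1
      simp [Function.comp_def]
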